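-- pv_equiv track=rewrite | github.com/brandonharris177/edabit-challanges | index.py | rounders
-- ===== SOURCE A (Python) =====
-- def rounders(n):
--     numList = [int(x) for x in str(n)[::-1]]
--     newNum = ''
--
--     for num in range(len(numList)-1):
--         if numList[num] >= 5:
--             numList[num+1]+=1
--
--     zeros = len(numList)-1
--     newNum = str(numList[-1]) + "0"*zeros
--
--     return int(newNum)
-- ===== SOURCE B (Python) =====
-- def rounders(n):
--     digits = [int(c) for c in str(n)]
--     num = 0
--     for d in digits:
--         num = num * 10 + d
--     factor = 1
--     for _ in range(len(digits) - 1):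
--         num = (num + 5 * factor) // (10 * factor) * (10 * factor)
--         factor *= 10
--     return num
-- ===== Notes on version B (the rewrite author's own statement) =====
-- stated objective: alternative
-- what changed: replaces A's reversed digit list with in-place carry cascade plus string rebuild by an integer fold of the digits followed by d-1 whole-number round-half-up passes to successive powers of ten
import Mathlib
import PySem

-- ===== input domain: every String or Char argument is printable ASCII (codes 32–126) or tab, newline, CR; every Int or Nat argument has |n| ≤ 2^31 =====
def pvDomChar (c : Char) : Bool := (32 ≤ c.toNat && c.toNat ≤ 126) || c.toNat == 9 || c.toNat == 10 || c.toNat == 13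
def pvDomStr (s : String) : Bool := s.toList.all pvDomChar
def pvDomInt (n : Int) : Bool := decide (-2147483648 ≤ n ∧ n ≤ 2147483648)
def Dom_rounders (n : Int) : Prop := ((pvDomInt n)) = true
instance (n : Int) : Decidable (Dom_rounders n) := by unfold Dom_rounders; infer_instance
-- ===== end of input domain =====

-- B replaces A's reversed digit list + in-place carry cascade + string rebuild with an integer
-- fold of the digits followed by d-1 whole-number round-half-up passes (alternative decomposition).

-- ===== PORT A =====
-- int(x) for a one-character string x; `none` (ValueError, e.g. on '-') is excluded by Pre_.
def pvCharInt (c : Char) : Int := (PySem.Int.ofChars? [c]).getD 0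

def rounders (n : Int) : Int :=
  -- numList = [int(x) for x in str(n)[::-1]]
  let numList : List Int := ((PySem.Int.toChars n).reverse).map pvCharInt
  -- for num in range(len(numList)-1): if numList[num] >= 5: numList[num+1] += 1
  let numList :=
    (PySem.List.pyRange 0 ((numList.length : Int) - 1) 1).foldl
      (fun l num =>
        if 5 ≤ PySem.List.pyGetD l num 0 then
          PySem.List.pySetD l (num + 1) (PySem.List.pyGetD l (num + 1) 0 + 1)
        else l)
      numList
  -- zeros = len(numList)-1 ; newNum = str(numList[-1]) + "0"*zeros
  let zeros : Int := (numList.length : Int) - 1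
  let newNum : List Char :=
    PySem.Int.toChars (PySem.List.pyGetD numList (-1) 0) ++ PySem.List.pyRepeat ['0'] zeros
  -- return int(newNum)
  (PySem.Int.ofChars? newNum).getD 0

-- ===== PORT B =====
def rounders_alt (n : Int) : Int :=
  -- digits = [int(c) for c in str(n)]
  let digits : List Int := (PySem.Int.toChars n).map pvCharInt
  -- num = 0; for d in digits: num = num*10 + d
  let num : Int := digits.foldl (fun a d => a * 10 + d) 0
  -- factor = 1; for _ in range(len(digits)-1): num = (num+5*factor)//(10*factor)*(10*factor); factor *= 10
  let st :=
    (PySem.List.pyRange 0 ((digits.length : Int) - 1) 1).foldl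
      (fun (st : Int × Int) _ =>
        (PySem.Int.floordiv (st.1 + 5 * st.2) (10 * st.2) * (10 * st.2), st.2 * 10))
      (num, 1)
  st.1

-- ===== PRECONDITION & SPEC =====
-- Pre_ excludes exactly the inputs where A raises: on negative n the sign character makes int(x) raise ValueError (B raises there too).
def Pre_rounders (n : Int) : Prop := 0 ≤ n
instance (n : Int) : Decidable (Pre_rounders n) := by unfold Pre_rounders; infer_instance
def pvWitness_rounders : Int := (1445)

def Spec_rounders (n : Int) (out : Int) : Prop := out = rounders_alt n
instance (n : Int) (out : Int) : Decidable (Spec_rounders n out) := by unfold Spec_rounders; infer_instance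

-- ===== CLAIM (what is proved, stated in full; the proofs are below) =====
def Claim_equal_rounders : Prop := ∀ (n : Int), Dom_rounders n → Pre_rounders n → Spec_rounders n (rounders n)

-- ===== LEMMAS AND PROOFS =====

-- lsb-first value of a digit list
def pvVal : List Int → Int
  | [] => 0
  | d :: t => d + 10 * pvVal t

-- carry out of the cascade over an lsb-first digit list, incoming carry c
def pvCarry : List Int → Int → Int
  | [], c => c
  | d :: t, c => pvCarry t (if 5 ≤ d + c then 1 else 0)

-- the digit list after the cascade, incoming carry c
def pvAdd : List Int → Int → List Int
  | [], _ => []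
  | d :: t, c => (d + c) :: pvAdd t (if 5 ≤ d + c then 1 else 0)

theorem pvVal_append_singleton (l : List Int) (d : Int) :
    pvVal (l ++ [d]) = pvVal l + d * 10 ^ l.length := by
  induction l with
  | nil => simp [pvVal]
  | cons x t ih => simp [pvVal, ih, pow_succ]; ring

theorem pvFoldl_build (L : List Int) (a : Int) :
    L.foldl (fun a d => a * 10 + d) a = a * 10 ^ L.length + pvVal L.reverse := by
  induction L generalizing a with
  | nil => simp [pvVal]
  | cons d t ih =>
    simp only [List.foldl_cons, ih, List.reverse_cons, pvVal_append_singleton,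
      List.length_reverse, List.length_cons]
    ring

theorem pvCarry_append_singleton (l : List Int) (d c : Int) :
    pvCarry (l ++ [d]) c = if 5 ≤ d + pvCarry l c then 1 else 0 := by
  induction l generalizing c with
  | nil => simp [pvCarry]
  | cons x t ih => simp [pvCarry, ih]

theorem pvAdd_append_singleton (l : List Int) (d c : Int) :
    pvAdd (l ++ [d]) c = pvAdd l c ++ [d + pvCarry l c] := by
  induction l generalizing c with
  | nil => simp [pvAdd, pvCarry]
  | cons x t ih => simp [pvAdd, pvCarry, ih]

theorem pvAdd_length (l : List Int) (c : Int) : (pvAdd l c).length = l.length := by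
  induction l generalizing c with
  | nil => rfl
  | cons x t ih => simp [pvAdd, ih]

theorem pvCarry_bounds (l : List Int) (c : Int) (h0 : 0 ≤ c) (h1 : c ≤ 1) :
    0 ≤ pvCarry l c ∧ pvCarry l c ≤ 1 := by
  induction l generalizing c with
  | nil => exact ⟨h0, h1⟩
  | cons x t ih =>
    simp only [pvCarry]
    split_ifs <;> exact ih _ (by omega) (by omega)

def pvDigits : List Char := ['0','1','2','3','4','5','6','7','8','9']

theorem pv_digitChar_mem (m : Nat) (h : m < 10) : Nat.digitChar m ∈ pvDigits := by
  interval_cases m <;> decide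

theorem pv_toDigitsCore_mem (f : Nat) : ∀ (n : Nat) (l : List Char) (c : Char),
    c ∈ Nat.toDigitsCore 10 f n l → c ∈ pvDigits ∨ c ∈ l := by
  induction f with
  | zero => intro n l c h; exact Or.inr h
  | succ f ih =>
    intro n l c h
    simp only [Nat.toDigitsCore] at h
    split at h
    · rcases List.mem_cons.mp h with h | h
      · exact Or.inl (h ▸ pv_digitChar_mem _ (Nat.mod_lt _ (by omega)))
      · exact Or.inr h
    · rcases ih _ _ _ h with h | h
      · exact Or.inl h
      · rcases List.mem_cons.mp h with h | h
        · exact Or.inl (h ▸ pv_digitChar_mem _ (Nat.mod_lt _ (by omega)))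
        · exact Or.inr h

theorem pv_toDigitsCore_len (f : Nat) : ∀ (n : Nat) (l : List Char),
    l.length < (Nat.toDigitsCore 10 (f + 1) n l).length := by
  induction f with
  | zero =>
    intro n l
    simp only [Nat.toDigitsCore]
    split <;> simp
  | succ f ih =>
    intro n l
    simp only [Nat.toDigitsCore]
    split
    · simp
    · calc l.length < (Nat.digitChar (n % 10) :: l).length := by simp
        _ ≤ _ := by
            have := ih (n / 10) (Nat.digitChar (n % 10) :: l)
            simp only [Nat.toDigitsCore] at this ⊢
            omega

theorem pvCharInt_digit (c : Char) (h : c ∈ pvDigits) :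
    0 ≤ pvCharInt c ∧ pvCharInt c ≤ 9 := by
  fin_cases h <;> decide

-- int(str(m) + "0"*z) = m * 10^z for the finitely many shapes the ports reach
theorem pv_parse (m : Int) (h0 : 0 ≤ m) (h1 : m ≤ 10) (z : Nat) (hz : z ≤ 9) :
    (PySem.Int.ofChars? (PySem.Int.toChars m ++ List.replicate z '0')).getD 0 = m * 10 ^ z := by
  interval_cases m <;> interval_cases z <;> decide

-- A's cascade loop, characterised
set_option maxRecDepth 8192 in
theorem pvA_loop (R : List Int) (j : Nat) (hj : j < R.length) :
    (PySem.List.pyRange 0 (j : Int) 1).foldl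
      (fun l num =>
        if 5 ≤ PySem.List.pyGetD l num 0 then
          PySem.List.pySetD l (num + 1) (PySem.List.pyGetD l (num + 1) 0 + 1)
        else l) R
    = pvAdd (R.take (j + 1)) 0 ++ R.drop (j + 1) := by
  induction j with
  | zero =>
    rw [PySem.List.pyRange_one_eq_nil (by omega)]
    cases R with
    | nil => simp at hj
    | cons d t => simp [pvAdd]
  | succ j ih =>
    have hjlen : j < R.length := by omega
    have hcast : ((j + 1 : Nat) : Int) = (j : Int) + 1 := by push_cast; ring
    rw [hcast, PySem.List.pyRange_one_succ_right (by positivity), List.foldl_append,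
      ih hjlen]
    simp only [List.foldl_cons, List.foldl_nil]
    have htake1 : R.take (j + 1) = R.take j ++ [R[j]] := List.take_succ_eq_append_getElem hjlen
    have htake2 : R.take (j + 2) = R.take (j + 1) ++ [R[j + 1]] :=
      List.take_succ_eq_append_getElem hj
    have hdrop1 : R.drop (j + 1) = R[j + 1] :: R.drop (j + 2) := List.drop_eq_getElem_cons hj
    set c := pvCarry (R.take j) 0 with hcdef
    have hA1 : pvAdd (R.take (j + 1)) 0 = pvAdd (R.take j) 0 ++ [R[j] + c] := by
      rw [htake1, pvAdd_append_singleton]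
    have hc1 : pvCarry (R.take (j + 1)) 0 = if 5 ≤ R[j] + c then 1 else 0 := by
      rw [htake1, pvCarry_append_singleton]
    have hA2 : pvAdd (R.take (j + 2)) 0
        = pvAdd (R.take (j + 1)) 0 ++ [R[j + 1] + pvCarry (R.take (j + 1)) 0] := by
      rw [htake2, pvAdd_append_singleton]
    have hlenT : (pvAdd (R.take j) 0).length = j := by
      rw [pvAdd_length, List.length_take]; omega
    rw [hA2, hc1, hA1, List.append_assoc, List.append_assoc, List.append_assoc]
    have hget1 : PySem.List.pyGetD (pvAdd (R.take j) 0 ++ ([R[j] + c] ++ R.drop (j + 1)))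
        ((j : Nat) : Int) 0 = R[j] + c := by
      rw [PySem.List.pyGetD_natCast, List.getD_eq_getElem?_getD,
        List.getElem?_append_right (by omega), hlenT]
      simp
    rw [hget1]
    have hget2 : PySem.List.pyGetD (pvAdd (R.take j) 0 ++ ([R[j] + c] ++ R.drop (j + 1)))
        (((j : Nat) : Int) + 1) 0 = R[j + 1] := by
      have : ((j : Nat) : Int) + 1 = ((j + 1 : Nat) : Int) := by push_cast; ring
      rw [this, PySem.List.pyGetD_natCast, List.getD_eq_getElem?_getD,
        List.getElem?_append_right (by omega), hlenT]
      have h1 : j + 1 - j = 1 := by omega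
      rw [h1, hdrop1]
      simp [List.getElem?_eq_getElem hj]
    have hset : PySem.List.pySetD (pvAdd (R.take j) 0 ++ ([R[j] + c] ++ R.drop (j + 1)))
        (((j : Nat) : Int) + 1) (R[j + 1] + 1)
        = pvAdd (R.take j) 0 ++ ([R[j] + c] ++ ([R[j + 1] + 1] ++ R.drop (j + 2))) := by
      have hc' : ((j : Nat) : Int) + 1 = ((j + 1 : Nat) : Int) := by push_cast; ring
      rw [hc', PySem.List.pySetD_natCast, List.set_append_right _ _ (by omega), hlenT]
      have h1 : j + 1 - j = 1 := by omega
      rw [h1, hdrop1]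
      simp
      rw [hdrop1, List.set_cons_zero]
    split_ifs with h5
    · rw [hget2, hset]
    · rw [hdrop1]
      simp

-- B's rounding-pass loop, characterised
theorem pvB_loop (R : List Int) (hR : ∀ d ∈ R, 0 ≤ d ∧ d ≤ 9) (j : Nat) (hj : j < R.length) :
    (PySem.List.pyRange 0 (j : Int) 1).foldl
      (fun (st : Int × Int) _ =>
        (PySem.Int.floordiv (st.1 + 5 * st.2) (10 * st.2) * (10 * st.2), st.2 * 10))
      (pvVal R, 1)
    = ((pvVal (R.drop j) + pvCarry (R.take j) 0) * 10 ^ j, 10 ^ j) := by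
  induction j with
  | zero =>
    rw [PySem.List.pyRange_one_eq_nil (by omega)]
    simp [pvCarry]
  | succ j ih =>
    have hjlen : j < R.length := by omega
    have hcast : ((j + 1 : Nat) : Int) = (j : Int) + 1 := by push_cast; ring
    rw [hcast, PySem.List.pyRange_one_succ_right (by positivity), List.foldl_append,
      ih hjlen]
    have hdrop : R.drop j = R[j] :: R.drop (j + 1) := List.drop_eq_getElem_cons hjlen
    have htake : R.take (j + 1) = R.take j ++ [R[j]] := List.take_succ_eq_append_getElem hjlen
    have hd : 0 ≤ R[j] ∧ R[j] ≤ 9 := hR _ (List.getElem_mem hjlen)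
    have hc : 0 ≤ pvCarry (R.take j) 0 ∧ pvCarry (R.take j) 0 ≤ 1 :=
      pvCarry_bounds _ _ (by omega) (by omega)
    have hP : (0 : Int) < 10 ^ j := by positivity
    set c := pvCarry (R.take j) 0 with hcdef
    set w := pvVal (R.drop (j + 1)) with hwdef
    have hval : pvVal (R.drop j) = R[j] + 10 * w := by rw [hdrop]; simp [pvVal, hwdef]
    have hcnext : pvCarry (R.take (j + 1)) 0 = if 5 ≤ R[j] + c then 1 else 0 := by
      rw [htake, pvCarry_append_singleton]
    simp only [List.foldl_cons, List.foldl_nil]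
    have harg : (pvVal (R.drop j) + c) * 10 ^ j + 5 * 10 ^ j
        = 10 ^ j * (R[j] + c + 5 + 10 * w) := by rw [hval]; ring
    have hden : (10 : Int) * 10 ^ j = 10 ^ j * 10 := by ring
    rw [harg, hden, PySem.Int.floordiv_eq_ediv_of_pos (by positivity),
      Int.mul_ediv_mul_of_pos _ _ hP]
    have hdiv : (R[j] + c + 5 + 10 * w) / 10 = w + (if 5 ≤ R[j] + c then 1 else 0) := by
      split_ifs <;> omega
    rw [hdiv, hcnext]
    have h2 : ((10:Int) ^ j) * 10 = 10 ^ (j + 1) := by ring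
    have h1 : (w + (if 5 ≤ R[j] + c then 1 else 0)) * (10 ^ j * 10) = (pvVal (R.drop (j+1)) + (if 5 ≤ R[j] + c then 1 else 0)) * 10 ^ (j + 1) := by rw [hwdef]; ring
    rw [Prod.mk.injEq]
    exact ⟨by rw [← h1], by rw [← h2]⟩


theorem pv_main (n : Int) (hDom : Dom_rounders n) (hPre : Pre_rounders n) :
    rounders n = rounders_alt n := by
  have hPre' : (0 : Int) ≤ n := hPre
  have htc : PySem.Int.toChars n = Nat.toDigits 10 n.toNat := by
    simp [PySem.Int.toChars, not_lt.mpr hPre']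
  set cs := Nat.toDigits 10 n.toNat with hcs
  have hpos : 0 < cs.length := by
    have h := pv_toDigitsCore_len n.toNat n.toNat ([] : List Char)
    simpa [hcs, Nat.toDigits] using h
  have hn2 : n ≤ 2147483648 := by
    unfold Dom_rounders pvDomInt at hDom
    simp only [decide_eq_true_eq] at hDom
    exact hDom.2
  have hlt : n.toNat < 10 ^ 10 := by omega
  have hle10 : cs.length ≤ 10 := Nat.toDigits_length 10 n.toNat 10 (by norm_num) hlt
  have hmem : ∀ c ∈ cs, c ∈ pvDigits := by
    intro c hc
    rcases pv_toDigitsCore_mem (n.toNat + 1) n.toNat [] c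
      (by simpa [hcs, Nat.toDigits] using hc) with h | h
    · exact h
    · simp at h
  set k := cs.length - 1 with hkdef
  have hklen : cs.length = k + 1 := by omega
  set R : List Int := (cs.reverse).map pvCharInt with hRdef
  have hRlen : R.length = k + 1 := by simp [hRdef, hklen]
  have hRrev : (cs.map pvCharInt).reverse = R := by
    rw [hRdef, List.map_reverse]
  have hR : ∀ d ∈ R, 0 ≤ d ∧ d ≤ 9 := by
    intro d hd
    rw [hRdef] at hd
    obtain ⟨c, hc, rfl⟩ := List.mem_map.mp hd
    exact pvCharInt_digit c (hmem c (List.mem_reverse.mp hc))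
  have hkR : k < R.length := by omega
  have hdk : 0 ≤ R[k] ∧ R[k] ≤ 9 := hR _ (List.getElem_mem hkR)
  have hc01 : 0 ≤ pvCarry (R.take k) 0 ∧ pvCarry (R.take k) 0 ≤ 1 :=
    pvCarry_bounds _ _ le_rfl (by omega)
  have htakeall : R.take (k + 1) = R := List.take_of_length_le (by omega)
  have hdropall : R.drop (k + 1) = [] := List.drop_eq_nil_of_le (by omega)
  have hReq : R = R.take k ++ [R[k]] := by
    calc R = R.take (k + 1) := htakeall.symm
      _ = R.take k ++ [R[k]] := List.take_succ_eq_append_getElem hkR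
  have hAfull : pvAdd (R.take (k + 1)) 0 ++ R.drop (k + 1)
      = pvAdd (R.take k) 0 ++ [R[k] + pvCarry (R.take k) 0] := by
    rw [htakeall, hdropall, List.append_nil]
    conv_lhs => rw [hReq]
    rw [pvAdd_append_singleton]
  -- A's value
  have hAval : rounders n
      = (R[k] + pvCarry (R.take k) 0) * 10 ^ k := by
    simp only [rounders]
    rw [htc, ← hRdef]
    have hcastA : (R.length : Int) - 1 = (k : Int) := by rw [hRlen]; push_cast; ring
    rw [hcastA, pvA_loop R k hkR, hAfull]
    have hlenS : ((pvAdd (R.take k) 0 ++ [R[k] + pvCarry (R.take k) 0]).length : Int) - 1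
        = (k : Int) := by
      have hl : (pvAdd (R.take k) 0 ++ [R[k] + pvCarry (R.take k) 0]).length = k + 1 := by
        rw [List.length_append, pvAdd_length, List.length_take,
          min_eq_left (by omega : k ≤ R.length), List.length_singleton]
      rw [hl]
      push_cast
      ring
    rw [hlenS, PySem.List.pyGetD_neg_one_append_singleton, PySem.List.pyRepeat_singleton]
    rw [Int.toNat_natCast]
    exact pv_parse _ (by omega) (by omega) k (by omega)
  -- B's value
  have hBval : rounders_alt n
      = (R[k] + pvCarry (R.take k) 0) * 10 ^ k := by
    simp only [rounders_alt]
    rw [htc]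
    have hnum : (cs.map pvCharInt).foldl (fun a d => a * 10 + d) 0 = pvVal R := by
      rw [pvFoldl_build, hRrev]
      ring
    rw [hnum]
    have hcastB : ((cs.map pvCharInt).length : Int) - 1 = (k : Int) := by
      simp [hklen]
    rw [hcastB, pvB_loop R hR k hkR]
    have hdropk : R.drop k = [R[k]] := by
      rw [List.drop_eq_getElem_cons hkR, hdropall]
    rw [hdropk]
    simp [pvVal]
  rw [hAval, hBval]

-- ===== VERDICT (by name: the statement is the Claim_ definition above) =====
theorem rounders_spec : Claim_equal_rounders := by
  intro n hDom hPre
  unfold Spec_rounders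
  exact pv_main n hDom hPre
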